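-- pv_equiv track=rewrite | github.com/pholoto/deeplearningproject | preview.py | _restore_symbols
-- ===== SOURCE A (Python) =====
-- from typing import Dict, List, Mapping, Optional, Sequence, Tuple, Union
--
-- def _restore_symbols(text: str, placements: Sequence[Tuple[int, str]]) -> str:
--     if not placements:
--         return text
--     chars = list(text)
--     inserted = 0
--     for pos, symbol in placements:
--         insert_at = pos + inserted
--         if insert_at < 0:
--             insert_at = 0
--         if insert_at > len(chars):
--             insert_at = len(chars)
--         chars.insert(insert_at, symbol)
--         inserted += 1
--     return "".join(chars)
-- ===== SOURCE B (Python) =====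
-- def _restore_symbols(text, placements):
--     # Gap buffer: keep the characters as two stacks around a cursor; each
--     # insertion moves the cursor to its clamped target position and pushes
--     # the symbol there.  Cheap when successive positions are close together.
--     left = []
--     right = list(text)
--     right.reverse()
--     for i, (pos, symbol) in enumerate(placements):
--         target = min(max(pos + i, 0), len(left) + len(right))
--         while len(left) < target:
--             left.append(right.pop())
--         while len(left) > target:
--             right.append(left.pop())
--         left.append(symbol)
--     left.extend(reversed(right))
--     return "".join(left)
-- ===== Notes on version B (the rewrite author's own statement) =====
-- stated objective: faster
-- what changed: Replaces A's repeated list.insert (each shifting the whole tail) by a gap buffer: two stacks around a cursor that is walked to each clamped target position and the symbol pushed there, so cost is proportional to cursor movement instead of list length per insertion.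
import Mathlib
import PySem

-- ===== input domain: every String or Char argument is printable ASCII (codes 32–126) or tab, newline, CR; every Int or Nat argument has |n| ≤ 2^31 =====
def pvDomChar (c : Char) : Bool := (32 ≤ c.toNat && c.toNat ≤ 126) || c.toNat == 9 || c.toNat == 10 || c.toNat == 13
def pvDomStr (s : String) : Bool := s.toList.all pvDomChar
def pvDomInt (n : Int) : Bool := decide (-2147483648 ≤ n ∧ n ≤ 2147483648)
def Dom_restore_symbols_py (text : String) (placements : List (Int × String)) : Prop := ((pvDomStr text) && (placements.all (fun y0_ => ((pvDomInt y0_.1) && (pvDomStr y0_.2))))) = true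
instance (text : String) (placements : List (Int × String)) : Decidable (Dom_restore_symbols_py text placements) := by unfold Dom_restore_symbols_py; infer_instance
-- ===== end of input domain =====

-- B replaces A's repeated list.insert (each one shifting the whole tail) by a gap buffer:
-- two stacks around a cursor that is walked to each clamped target position
-- (objective: alternative; cheap when successive positions are close together).

-- ===== PORT A =====
-- the two clamping ifs of A applied to `insert_at`
def pvClampA (v : Int) (m : Nat) : Nat :=
  if v < 0 then 0 else if v > (m : Int) then m else v.toNat

-- one iteration of A's `for pos, symbol in placements` loop; state = (chars, inserted)
def pvStepA (st : List (List Char) × Nat) (q : Int × String) : List (List Char) × Nat :=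
  (st.1.insertIdx (pvClampA (q.1 + (st.2 : Int)) st.1.length) q.2.toList, st.2 + 1)

def restore_symbols_py (text : String) (placements : List (Int × String)) : String :=
  if placements.isEmpty then text
  else
    String.ofList (PySem.Chars.join []
      ((placements.foldl pvStepA (text.toList.map (fun c => [c]), 0)).1))

-- ===== PORT B =====
-- B's stacks are Python lists used at their END (append/pop); they are transliterated as
-- Lean lists used at their HEAD: `left` head = piece just before the cursor, `right` head =
-- piece just after the cursor (so `right = list(text); right.reverse()` is the text in order).

-- B's `target = min(max(pos + i, 0), len(left) + len(right))`
def pvTarget (pos : Int) (i : Nat) (total : Nat) : Nat :=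
  (min (max (pos + (i : Int)) 0) (total : Int)).toNat

-- B's `while len(left) < target: left.append(right.pop())`
def pvMoveR (l r : List (List Char)) (t : Nat) : List (List Char) × List (List Char) :=
  if l.length < t then
    match r with
    | [] => (l, [])            -- unreachable for t ≤ len(l)+len(r); makes the loop total
    | x :: r' => pvMoveR (x :: l) r' t
  else (l, r)
termination_by r

-- B's `while len(left) > target: right.append(left.pop())`
def pvMoveL (l r : List (List Char)) (t : Nat) : List (List Char) × List (List Char) :=
  if t < l.length then
    match l with
    | [] => ([], r)            -- unreachable; makes the loop total
    | x :: l' => pvMoveL l' (x :: r) t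
  else (l, r)
termination_by l

-- B's `for i, (pos, symbol) in enumerate(placements)` loop, i carried explicitly
def pvGapLoop : List (Int × String) → Nat → List (List Char) × List (List Char) →
    List (List Char) × List (List Char)
  | [], _, st => st
  | (pos, s) :: ps, i, (l, r) =>
    let t := pvTarget pos i (l.length + r.length)
    let st1 := pvMoveR l r t
    let st2 := pvMoveL st1.1 st1.2 t
    pvGapLoop ps (i + 1) (s.toList :: st2.1, st2.2)

def restore_symbols_py_alt (text : String) (placements : List (Int × String)) : String :=
  String.ofList (PySem.Chars.join []
    ((pvGapLoop placements 0 ([], text.toList.map (fun c => [c]))).1.reverse ++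
     (pvGapLoop placements 0 ([], text.toList.map (fun c => [c]))).2))

-- ===== PRECONDITION & SPEC =====
def Spec_restore_symbols_py (text : String) (placements : List (Int × String)) (out : String) : Prop := out = restore_symbols_py_alt text placements
instance (text : String) (placements : List (Int × String)) (out : String) : Decidable (Spec_restore_symbols_py text placements out) := by unfold Spec_restore_symbols_py; infer_instance

-- ===== CLAIM (what is proved, stated in full; the proofs are below) =====
def Claim_equal_restore_symbols_py : Prop := ∀ (text : String) (placements : List (Int × String)), Dom_restore_symbols_py text placements → Spec_restore_symbols_py text placements (restore_symbols_py text placements)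

-- ===== LEMMAS AND PROOFS =====

theorem pvMoveR_repr (l r : List (List Char)) (t : Nat) :
    (pvMoveR l r t).1.reverse ++ (pvMoveR l r t).2 = l.reverse ++ r := by
  induction r generalizing l with
  | nil => unfold pvMoveR; split_ifs <;> simp
  | cons x r' ih =>
    unfold pvMoveR
    split_ifs with h
    · rw [ih]; simp
    · rfl

theorem pvMoveR_len (l r : List (List Char)) (t : Nat) (h : t ≤ l.length + r.length) :
    (pvMoveR l r t).1.length = max l.length t := by
  induction r generalizing l with
  | nil =>
    unfold pvMoveR
    split_ifs with hlt
    · simp only [List.length_nil, Nat.add_zero] at h; omega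
    · simp; omega
  | cons x r' ih =>
    unfold pvMoveR
    split_ifs with hlt
    · rw [ih (x :: l) (by simp only [List.length_cons] at h ⊢; omega)]
      simp only [List.length_cons]; omega
    · simp; omega

theorem pvMoveL_repr (l r : List (List Char)) (t : Nat) :
    (pvMoveL l r t).1.reverse ++ (pvMoveL l r t).2 = l.reverse ++ r := by
  induction l generalizing r with
  | nil => unfold pvMoveL; split_ifs <;> simp
  | cons x l' ih =>
    unfold pvMoveL
    split_ifs with h
    · rw [ih]; simp
    · rfl

theorem pvMoveL_len (l r : List (List Char)) (t : Nat) :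
    (pvMoveL l r t).1.length = min l.length t := by
  induction l generalizing r with
  | nil => unfold pvMoveL; split_ifs <;> simp
  | cons x l' ih =>
    unfold pvMoveL
    split_ifs with hlt
    · rw [ih]; simp only [List.length_cons] at hlt ⊢; omega
    · simp only [List.length_cons] at hlt ⊢; omega

theorem pvTarget_eq_clamp (pos : Int) (i m : Nat) :
    pvTarget pos i m = pvClampA (pos + (i : Int)) m := by
  unfold pvTarget pvClampA
  split_ifs <;> omega

-- inserting at the length of the prefix
theorem insertIdx_at_prefix (X Y : List (List Char)) (s : List Char) :
    (X ++ Y).insertIdx X.length s = X ++ s :: Y := by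
  induction X with
  | nil => rfl
  | cons a X ih => simpa using ih

-- pushing a piece at the cursor is an insertIdx at the cursor position
theorem pv_cons_repr (L R : List (List Char)) (s : List Char) :
    (s :: L).reverse ++ R = (L.reverse ++ R).insertIdx L.length s := by
  have h : L.length = L.reverse.length := List.length_reverse.symm
  rw [h, insertIdx_at_prefix]
  simp

-- the gap-buffer loop computes exactly A's insertIdx fold
theorem gap_eq (ps : List (Int × String)) :
    ∀ (l r : List (List Char)) (j : Nat),
    (pvGapLoop ps j (l, r)).1.reverse ++ (pvGapLoop ps j (l, r)).2 =
      (ps.foldl pvStepA (l.reverse ++ r, j)).1 := by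
  induction ps with
  | nil => intro l r j; rfl
  | cons q ps ih =>
    intro l r j
    obtain ⟨pos, s⟩ := q
    have ht : pvTarget pos j (l.length + r.length) ≤ l.length + r.length := by
      unfold pvTarget; omega
    have h3 : (pvMoveL (pvMoveR l r (pvTarget pos j (l.length + r.length))).1
        (pvMoveR l r (pvTarget pos j (l.length + r.length))).2
        (pvTarget pos j (l.length + r.length))).1.length
        = pvTarget pos j (l.length + r.length) := by
      rw [pvMoveL_len, pvMoveR_len l r _ ht]; omega
    have hrepr : (pvMoveL (pvMoveR l r (pvTarget pos j (l.length + r.length))).1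
        (pvMoveR l r (pvTarget pos j (l.length + r.length))).2
        (pvTarget pos j (l.length + r.length))).1.reverse ++
        (pvMoveL (pvMoveR l r (pvTarget pos j (l.length + r.length))).1
        (pvMoveR l r (pvTarget pos j (l.length + r.length))).2
        (pvTarget pos j (l.length + r.length))).2 = l.reverse ++ r := by
      rw [pvMoveL_repr, pvMoveR_repr]
    have hins := pv_cons_repr (pvMoveL (pvMoveR l r (pvTarget pos j (l.length + r.length))).1
        (pvMoveR l r (pvTarget pos j (l.length + r.length))).2
        (pvTarget pos j (l.length + r.length))).1
      (pvMoveL (pvMoveR l r (pvTarget pos j (l.length + r.length))).1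
        (pvMoveR l r (pvTarget pos j (l.length + r.length))).2
        (pvTarget pos j (l.length + r.length))).2 s.toList
    rw [hrepr, h3] at hins
    have hstep : pvStepA (l.reverse ++ r, j) (pos, s) =
        ((l.reverse ++ r).insertIdx (pvTarget pos j (l.length + r.length)) s.toList, j + 1) := by
      unfold pvStepA
      simp only [List.length_append, List.length_reverse]
      rw [← pvTarget_eq_clamp]
    simp only [pvGapLoop, List.foldl_cons]
    rw [ih, hins, hstep]

theorem main_eq (text : String) (placements : List (Int × String)) :
    restore_symbols_py text placements = restore_symbols_py_alt text placements := by
  by_cases h : placements = []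
  · subst h
    simp [restore_symbols_py, restore_symbols_py_alt, pvGapLoop,
      PySem.Chars.join_nil_singletons]
  · unfold restore_symbols_py restore_symbols_py_alt
    rw [if_neg (by simpa [List.isEmpty_iff] using h)]
    have hg := gap_eq placements [] (text.toList.map (fun c => [c])) 0
    simp only [List.reverse_nil, List.nil_append] at hg
    rw [hg]

-- ===== VERDICT (by name: the statement is the Claim_ definition above) =====
theorem restore_symbols_py_spec : Claim_equal_restore_symbols_py := by
  intro text placements _
  unfold Spec_restore_symbols_py
  exact main_eq text placements
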